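-- pv_equiv track=rewrite | github.com/Saintghetto17/Python-SHAD | 03.1.FunctionsStringsIO/tasks/count_util/count_util.py | count_util
-- ===== SOURCE A (Python) =====
-- import copy
--
-- def count_util(text: str, flags: str | None = None) -> dict[str, int]:
--     """
--     :param text: text to count entities
--     :param flags: flags in command-like format - can be:
--         * -m stands for counting characters
--         * -l stands for counting lines
--         * -L stands for getting length of the longest line
--         * -w stands for counting words
--     More than one flag can be passed at the same time, for example:
--         * "-l -m"
--         * "-lLw"
--     Ommiting flags or passing empty string is equivalent to "-mlLw"
--     :return: mapping from string keys to corresponding counter, where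
--     keys are selected according to the received flags:
--         * "chars" - amount of characters
--         * "lines" - amount of lines
--         * "longest_line" - the longest line length
--         * "words" - amount of words
--     """
--     symbols_mapping: dict[str, str] = {'m': 'chars', 'l': 'lines', 'L': 'longest_line', 'w': 'words'}
--     dict_base: dict[str, int] = {'lines': 0, 'words': 0, 'chars': 0, 'longest_line': 12}
--     txt = copy.copy(text)
--     words = len(txt.split())
--     dict_base['words'] = words
--     lst_lines = txt.split('\n')
--     tabulated_tokens = txt.split('\t')
--     chars = 0
--     for e in tabulated_tokens:
--         chars = chars + len(e)
--     lines = len(lst_lines) - 1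
--     max_line = -1
--     for e in lst_lines:
--         length = len(e)
--         if length > max_line:
--             max_line = length
--     dict_base['lines'] = lines
--     dict_base['longest_line'] = max_line
--     dict_base['chars'] = chars
--     res_dict: dict[str, int] = {}
--     if flags is None or flags == '':
--         return dict_base
--     else:
--         for symbol in flags:
--             if symbol == 'm' or symbol == 'l' or symbol == 'L' or symbol == 'w':
--                 res_dict[symbols_mapping[symbol]] = dict_base[symbols_mapping[symbol]]
--     return res_dict
-- ===== SOURCE B (Python) =====
-- def count_util(text: str, flags: str | None = None) -> dict[str, int]:
--     chars = lines = words = cur = longest = 0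
--     prev_space = True
--     for ch in text:
--         if ch != '\t':
--             chars += 1
--         if ch == '\n':
--             lines += 1
--             cur = 0
--         else:
--             cur += 1
--             if cur > longest:
--                 longest = cur
--         if ch.isspace():
--             prev_space = True
--         else:
--             if prev_space:
--                 words += 1
--             prev_space = False
--     counts = {'lines': lines, 'words': words, 'chars': chars, 'longest_line': longest}
--     if not flags:
--         return counts
--     keys = {'m': 'chars', 'l': 'lines', 'L': 'longest_line', 'w': 'words'}
--     return {keys[c]: counts[keys[c]] for c in flags if c in keys}
-- ===== Notes on version B (the rewrite author's own statement) =====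
-- stated objective: simpler
-- what changed: A makes four separate passes over the text (a whitespace split for words, a newline split scanned twice for lines and longest line, a tab split for chars); B computes all four counters in one character-by-character scan maintaining a current-line length, a running maximum and a whitespace-transition word counter, then selects keys from the flags the same way A does.
import Mathlib
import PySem

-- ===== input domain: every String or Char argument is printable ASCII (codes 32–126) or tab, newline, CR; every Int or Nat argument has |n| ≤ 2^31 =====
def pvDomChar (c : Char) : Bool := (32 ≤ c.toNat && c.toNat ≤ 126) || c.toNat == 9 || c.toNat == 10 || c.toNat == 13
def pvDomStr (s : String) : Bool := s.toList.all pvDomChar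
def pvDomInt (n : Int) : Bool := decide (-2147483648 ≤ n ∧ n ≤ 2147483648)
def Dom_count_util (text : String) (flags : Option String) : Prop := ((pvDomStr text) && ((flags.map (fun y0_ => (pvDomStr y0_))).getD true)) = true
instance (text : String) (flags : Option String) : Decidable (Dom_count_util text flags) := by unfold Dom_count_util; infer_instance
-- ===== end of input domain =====

-- B replaces A's four separate split/loop passes by one character-by-character scan that
-- maintains all four counters at once (objective: simpler single-pass decomposition).

-- ===== PORT A =====
def count_util (text : String) (flags : Option String) : List (String × Int) :=
  let symbolsMapping : PySem.Dict Char String :=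
    PySem.Dict.ofList [('m', "chars"), ('l', "lines"), ('L', "longest_line"), ('w', "words")]
  let dictBase0 : PySem.Dict String Int :=
    PySem.Dict.ofList [("lines", 0), ("words", 0), ("chars", 0), ("longest_line", 12)]
  let txt := text.toList
  let words : Int := ((PySem.Chars.split₀ txt).length : Int)
  let dictBase1 := dictBase0.insert "words" words
  let lstLines := PySem.Chars.splitOn txt ['\n']
  let tabulatedTokens := PySem.Chars.splitOn txt ['\t']
  let chars : Int := tabulatedTokens.foldl (fun a e => a + (e.length : Int)) 0
  let lines : Int := (lstLines.length : Int) - 1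
  let maxLine : Int :=
    lstLines.foldl (fun m e => if (e.length : Int) > m then (e.length : Int) else m) (-1)
  let dictBase :=
    ((dictBase1.insert "lines" lines).insert "longest_line" maxLine).insert "chars" chars
  match flags with
  | none => dictBase.items
  | some f =>
    if f = "" then dictBase.items
    else
      (f.toList.foldl
        (fun (res : PySem.Dict String Int) symbol =>
          if symbol = 'm' ∨ symbol = 'l' ∨ symbol = 'L' ∨ symbol = 'w' then
            res.insert (symbolsMapping.getD symbol "") (dictBase.getD (symbolsMapping.getD symbol "") 0)
          else res)
        PySem.Dict.empty).items

-- ===== PORT B =====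
-- loop body of Source B's single scan
def bstep (s : Int × Int × Int × Int × Int × Bool) (ch : Char) : Int × Int × Int × Int × Int × Bool :=
  let (chars, lines, words, cur, longest, prev) := s
  let chars := if ch ≠ '\t' then chars + 1 else chars
  let lines := if ch = '\n' then lines + 1 else lines
  let cur := if ch = '\n' then 0 else cur + 1
  let longest := if ch = '\n' then longest else (if cur > longest then cur else longest)
  let words := if PySem.Chars.isspace ch then words else (if prev then words + 1 else words)
  let prev := if PySem.Chars.isspace ch then true else false
  (chars, lines, words, cur, longest, prev)

def count_util_alt (text : String) (flags : Option String) : List (String × Int) :=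
  let st := text.toList.foldl bstep (0, 0, 0, 0, 0, true)
  let counts : PySem.Dict String Int :=
    PySem.Dict.ofList
      [("lines", st.2.1), ("words", st.2.2.1), ("chars", st.1), ("longest_line", st.2.2.2.2.1)]
  match flags with
  | none => counts.items
  | some f =>
    if f = "" then counts.items
    else
      let keys : PySem.Dict Char String :=
        PySem.Dict.ofList [('m', "chars"), ('l', "lines"), ('L', "longest_line"), ('w', "words")]
      (f.toList.foldl
        (fun (res : PySem.Dict String Int) c =>
          if keys.contains c then
            res.insert (keys.getD c "") (counts.getD (keys.getD c "") 0)
          else res)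
        PySem.Dict.empty).items

-- ===== PRECONDITION & SPEC =====
def Spec_count_util (text : String) (flags : Option String) (out : List (String × Int)) : Prop := out = count_util_alt text flags
instance (text : String) (flags : Option String) (out : List (String × Int)) : Decidable (Spec_count_util text flags out) := by unfold Spec_count_util; infer_instance

-- ===== CLAIM (what is proved, stated in full; the proofs are below) =====
def Claim_equal_count_util : Prop := ∀ (text : String) (flags : Option String), Dom_count_util text flags → Spec_count_util text flags (count_util text flags)

-- ===== LEMMAS AND PROOFS =====

-- pieces t cs = the list Python's cs.split(t) produces (single-character separator)
def pieces (t : Char) : List Char → List (List Char)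
  | [] => [[]]
  | c :: cs => if t = c then [] :: pieces t cs else (c :: (pieces t cs).headI) :: (pieces t cs).tail

-- the first piece of a split, extended to the left by `pre`
def joinFirst (pre : List Char) : List (List Char) → List (List Char)
  | [] => [pre]
  | p :: ps => (pre ++ p) :: ps

-- running maximum line length, starting a line already `cur` characters long
def Gi (cur : Int) : List Char → Int
  | [] => cur
  | c :: cs => if c = '\n' then max cur (Gi 0 cs) else Gi (cur + 1) cs

-- number of whitespace-delimited words, `prev` = "currently between words"
def wcount (prev : Bool) : List Char → Nat
  | [] => 0
  | c :: cs => if PySem.Chars.isspace c then wcount true cs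
               else (if prev then 1 else 0) + wcount false cs

-- final current-line length / final prev flag of B's scan
def LL (cur : Int) : List Char → Int
  | [] => cur
  | c :: cs => if c = '\n' then LL 0 cs else LL (cur + 1) cs

def LP (prev : Bool) : List Char → Bool
  | [] => prev
  | c :: cs => if PySem.Chars.isspace c then LP true cs else LP false cs

-- common normal form both ports reduce to
def render (lines words chars longest : Int) (flags : Option String) : List (String × Int) :=
  let base : List (String × Int) :=
    [("lines", lines), ("words", words), ("chars", chars), ("longest_line", longest)]
  match flags with
  | none => base
  | some f =>
    if f = "" then base
    else
      (f.toList.foldl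
        (fun (res : PySem.Dict String Int) c =>
          if c = 'm' then res.insert "chars" chars
          else if c = 'l' then res.insert "lines" lines
          else if c = 'L' then res.insert "longest_line" longest
          else if c = 'w' then res.insert "words" words
          else res)
        PySem.Dict.empty).items

theorem pieces_cons_eq (t : Char) (cs : List Char) :
    pieces t cs = (pieces t cs).headI :: (pieces t cs).tail := by
  cases cs with
  | nil => rfl
  | cons c cs => simp only [pieces]; split <;> rfl

theorem joinFirst_pieces_nil (t : Char) (cs : List Char) :
    joinFirst [] (pieces t cs) = pieces t cs := by
  conv_lhs => rw [pieces_cons_eq]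
  simp only [joinFirst, List.nil_append]
  exact (pieces_cons_eq t cs).symm

theorem splitOn_go_step (t : Char) (fuel : Nat) (c : Char) (rest cur : List Char)
    (acc : List (List Char)) :
    PySem.Chars.splitOn.go [t] (fuel + 1) (c :: rest) cur acc =
      if t = c then PySem.Chars.splitOn.go [t] fuel rest [] (cur.reverse :: acc)
      else PySem.Chars.splitOn.go [t] fuel rest (c :: cur) acc := by
  rw [PySem.Chars.splitOn.go]
  simp [List.isPrefixOf]

theorem go_eq_pieces (t : Char) (cs : List Char) :
    ∀ (fuel : Nat) (cur : List Char) (acc : List (List Char)), cs.length < fuel →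
      PySem.Chars.splitOn.go [t] fuel cs cur acc =
        acc.reverse ++ joinFirst cur.reverse (pieces t cs) := by
  induction cs with
  | nil =>
    intro fuel cur acc h
    cases fuel with
    | zero => omega
    | succ f =>
      rw [PySem.Chars.splitOn.go]
      all_goals first
        | simp [pieces, joinFirst]
        | omega
  | cons c cs ih =>
    intro fuel cur acc h
    cases fuel with
    | zero => simp at h
    | succ f =>
      rw [splitOn_go_step]
      by_cases hc : t = c
      · subst hc
        rw [if_pos rfl, ih f [] _ (by simpa using h)]
        obtain ⟨p, ps, hP⟩ : ∃ p ps, pieces t cs = p :: ps := ⟨_, _, pieces_cons_eq t cs⟩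
        simp [pieces, joinFirst, hP]
      · rw [if_neg hc, ih f (c :: cur) acc (by simpa using h)]
        simp only [pieces, if_neg hc]
        obtain ⟨p, ps, hP⟩ : ∃ p ps, pieces t cs = p :: ps := ⟨_, _, pieces_cons_eq t cs⟩
        rw [hP]
        simp [joinFirst]

theorem splitOn_eq_pieces (t : Char) (cs : List Char) :
    PySem.Chars.splitOn cs [t] = pieces t cs := by
  unfold PySem.Chars.splitOn
  rw [go_eq_pieces t cs (cs.length + 1) [] [] (by omega)]
  simp [joinFirst_pieces_nil]

theorem le_Gi (cur : Int) (cs : List Char) : cur ≤ Gi cur cs := by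
  induction cs generalizing cur with
  | nil => simp [Gi]
  | cons c cs ih =>
    simp only [Gi]
    split
    · exact le_max_left _ _
    · exact le_trans (by omega) (ih (cur + 1))

theorem pieces_length (t : Char) (cs : List Char) :
    (pieces t cs).length = cs.count t + 1 := by
  induction cs with
  | nil => simp [pieces]
  | cons c cs ih =>
    simp only [pieces, List.count_cons]
    by_cases hc : t = c
    · subst hc; simp [ih]
    · rw [if_neg hc]
      have h2 : (c == t) = false := by simp; exact fun h => hc h.symm
      simp only [List.length_cons, h2, Bool.false_eq_true, if_false, Nat.add_zero]
      rw [show (pieces t cs).tail.length + 1 = ((pieces t cs).headI :: (pieces t cs).tail).length from rfl,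
          ← pieces_cons_eq, ih]

theorem chars_fold (t : Char) (cs : List Char) :
    ∀ (a : Int) (pre : List Char),
      (joinFirst pre (pieces t cs)).foldl (fun a e => a + (e.length : Int)) a =
        a + pre.length + (cs.countP (fun c => c != t) : Nat) := by
  induction cs with
  | nil => intro a pre; simp [pieces, joinFirst]
  | cons c cs ih =>
    intro a pre
    by_cases hc : t = c
    · simp only [pieces, if_pos hc, joinFirst, List.foldl_cons]
      rw [← joinFirst_pieces_nil t cs, ih]
      have h2 : (c != t) = false := by simp; exact hc.symm
      simp [List.countP_cons, h2] <;> push_cast <;> ring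
    · simp only [pieces, if_neg hc]
      rw [pieces_cons_eq t cs]
      show (joinFirst pre ((c :: (pieces t cs).headI) :: (pieces t cs).tail)).foldl _ a = _
      have hj : (joinFirst pre ((c :: (pieces t cs).headI) :: (pieces t cs).tail)) =
          joinFirst (pre ++ [c]) ((pieces t cs).headI :: (pieces t cs).tail) := by
        simp [joinFirst]
      rw [hj, ← pieces_cons_eq, ih]
      have h2 : (c != t) = true := by simp; exact fun h => hc h.symm
      simp [List.countP_cons, h2] <;> push_cast <;> ring

theorem max_fold (cs : List Char) :
    ∀ (m : Int) (pre : List Char),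
      (joinFirst pre (pieces '\n' cs)).foldl
          (fun m e => if (e.length : Int) > m then (e.length : Int) else m) m =
        max m (Gi pre.length cs) := by
  induction cs with
  | nil =>
    intro m pre
    simp only [pieces, joinFirst, List.foldl_cons, List.foldl_nil, Gi, List.append_nil]
    split <;> omega
  | cons c cs ih =>
    intro m pre
    by_cases hc : c = '\n'
    · subst hc
      have hp : pieces '\n' ('\n' :: cs) = [] :: pieces '\n' cs := by simp [pieces]
      have hj : joinFirst pre ([] :: pieces '\n' cs) = pre :: pieces '\n' cs := by
        simp [joinFirst]
      rw [hp, hj, ← joinFirst_pieces_nil '\n' cs]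
      simp only [List.foldl_cons]
      have hstep : (if (pre.length : Int) > m then (pre.length : Int) else m) = max m pre.length := by
        split <;> omega
      rw [hstep, ih]
      have hGi : Gi (pre.length : Int) ('\n' :: cs) = max (pre.length : Int) (Gi 0 cs) := by
        simp [Gi]
      rw [hGi]
      simp only [List.length_nil, Nat.cast_zero]
      omega
    · have hc' : ¬ ('\n' = c) := fun h => hc h.symm
      simp only [pieces, if_neg hc']
      rw [pieces_cons_eq '\n' cs]
      show (joinFirst pre ((c :: (pieces '\n' cs).headI) :: (pieces '\n' cs).tail)).foldl _ m = _
      have hj : (joinFirst pre ((c :: (pieces '\n' cs).headI) :: (pieces '\n' cs).tail)) =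
          joinFirst (pre ++ [c]) ((pieces '\n' cs).headI :: (pieces '\n' cs).tail) := by
        simp [joinFirst]
      rw [hj, ← pieces_cons_eq, ih]
      simp only [Gi, if_neg hc, List.length_append, List.length_cons, List.length_nil]
      push_cast
      ring_nf

theorem split0_go_len (cs : List Char) :
    ∀ (cur : List Char) (acc : List (List Char)),
      (PySem.Chars.split₀.go cs cur acc).length =
        acc.length + (if cur.isEmpty then 0 else 1) + wcount cur.isEmpty cs := by
  induction cs with
  | nil =>
    intro cur acc
    rw [PySem.Chars.split₀.go]
    simp only [wcount]
    split <;> simp_all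
  | cons c cs ih =>
    intro cur acc
    rw [PySem.Chars.split₀.go]
    by_cases hs : PySem.Chars.isspace c
    · rw [if_pos hs]
      by_cases he : cur.isEmpty
      · rw [if_pos he, ih]
        simp [wcount, hs, he]
      · rw [if_neg he, ih]
        simp [wcount, hs, he]
    · rw [if_neg hs, ih]
      simp only [wcount, hs, List.isEmpty_cons, Bool.false_eq_true, if_false]
      by_cases he : cur.isEmpty <;> simp [he] <;> omega

theorem split0_len (cs : List Char) :
    (PySem.Chars.split₀ cs).length = wcount true cs := by
  unfold PySem.Chars.split₀
  rw [split0_go_len]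
  simp

-- the single scan of B computes all six components
theorem bscan (cs : List Char) :
    ∀ (chars lines words cur longest : Int) (prev : Bool),
      0 ≤ cur → cur ≤ longest →
      cs.foldl bstep (chars, lines, words, cur, longest, prev) =
        (chars + (cs.countP (fun c => c != '\t') : Nat),
         lines + (cs.count '\n' : Nat),
         words + (wcount prev cs : Nat),
         LL cur cs,
         max longest (Gi cur cs),
         LP prev cs) := by
  induction cs with
  | nil => intro chars lines words cur longest prev h0 h1; simp [wcount, LL, LP, Gi]; omega
  | cons c cs ih =>
    intro chars lines words cur longest prev h0 h1
    rw [List.foldl_cons]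
    by_cases hn : c = '\n'
    · subst hn
      have hsp : PySem.Chars.isspace '\n' = true := rfl
      have hb : bstep (chars, lines, words, cur, longest, prev) '\n' =
          (chars + 1, lines + 1, words, 0, longest, true) := by
        simp [bstep, hsp]
      rw [hb, ih (chars + 1) (lines + 1) words 0 longest true le_rfl (by omega)]
      have hg := le_Gi (0 : Int) cs
      have e1 : List.countP (fun c => c != '\t') ('\n' :: cs) =
          List.countP (fun c => c != '\t') cs + 1 := by simp [List.countP_cons]
      have e2 : List.count '\n' ('\n' :: cs) = List.count '\n' cs + 1 := by
        simp [List.count_cons]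
      have e3 : wcount prev ('\n' :: cs) = wcount true cs := by simp [wcount, hsp]
      have e4 : LL cur ('\n' :: cs) = LL 0 cs := by simp [LL]
      have e5 : Gi cur ('\n' :: cs) = max cur (Gi 0 cs) := by simp [Gi]
      have e6 : LP prev ('\n' :: cs) = LP true cs := by simp [LP, hsp]
      rw [e1, e2, e3, e4, e5, e6]
      simp only [Prod.mk.injEq, and_true, true_and]
      refine ⟨by push_cast; ring, by push_cast; ring, by omega⟩
    · by_cases hs : PySem.Chars.isspace c
      · have hb : bstep (chars, lines, words, cur, longest, prev) c =
            (chars + (if c ≠ '\t' then 1 else 0), lines, words, cur + 1,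
             max longest (cur + 1), true) := by
          simp only [bstep, if_neg hn, hs, if_true]
          have : (if cur + 1 > longest then cur + 1 else longest) = max longest (cur + 1) := by
            split <;> omega
          rw [this]
          split <;> simp
        rw [hb, ih _ lines words (cur + 1) (max longest (cur + 1)) true (by omega) (by omega)]
        have hg := le_Gi (cur + 1) cs
        have e1 : List.countP (fun c => c != '\t') (c :: cs) =
            List.countP (fun c => c != '\t') cs + (if c ≠ '\t' then 1 else 0) := by
          by_cases ht : c = '\t' <;> simp [List.countP_cons, ht]
        have e2 : List.count '\n' (c :: cs) = List.count '\n' cs := by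
          simp [List.count_cons, hn]
        have e3 : wcount prev (c :: cs) = wcount true cs := by simp [wcount, hs]
        have e4 : LL cur (c :: cs) = LL (cur + 1) cs := by simp [LL, hn]
        have e5 : Gi cur (c :: cs) = Gi (cur + 1) cs := by simp [Gi, hn]
        have e6 : LP prev (c :: cs) = LP true cs := by simp [LP, hs]
        rw [e2, e3, e4, e5, e6]
        simp only [Prod.mk.injEq, and_true, true_and]
        refine ⟨by rw [e1]; push_cast; ring, by omega⟩
      · have ht : c ≠ '\t' := fun h => hs (h ▸ rfl)
        have hb : bstep (chars, lines, words, cur, longest, prev) c =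
            (chars + 1, lines, (if prev then words + 1 else words), cur + 1,
             max longest (cur + 1), false) := by
          simp only [bstep, if_neg hn, hs, if_pos ht]
          have : (if cur + 1 > longest then cur + 1 else longest) = max longest (cur + 1) := by
            split <;> omega
          rw [this]
          simp
        rw [hb, ih _ lines _ (cur + 1) (max longest (cur + 1)) false (by omega) (by omega)]
        have hg := le_Gi (cur + 1) cs
        have e1 : List.countP (fun c => c != '\t') (c :: cs) =
            List.countP (fun c => c != '\t') cs + 1 := by
          simp [List.countP_cons, ht]
        have e2 : List.count '\n' (c :: cs) = List.count '\n' cs := by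
          simp [List.count_cons, hn]
        have e3 : wcount prev (c :: cs) = (if prev then 1 else 0) + wcount false cs := by
          simp [wcount, hs]
        have e4 : LL cur (c :: cs) = LL (cur + 1) cs := by simp [LL, hn]
        have e5 : Gi cur (c :: cs) = Gi (cur + 1) cs := by simp [Gi, hn]
        have e6 : LP prev (c :: cs) = LP false cs := by simp [LP, hs]
        rw [e1, e2, e3, e4, e5, e6]
        simp only [Prod.mk.injEq, and_true, true_and]
        refine ⟨by push_cast; ring, ?_, by omega⟩
        cases prev <;> simp <;> push_cast <;> ring

-- A reduces to the normal form
theorem A_norm (text : String) (flags : Option String) :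
    count_util text flags =
      render (text.toList.count '\n') (wcount true text.toList)
        (text.toList.countP (fun c => c != '\t')) (Gi 0 text.toList) flags := by
  unfold count_util render
  have hw : ((PySem.Chars.split₀ text.toList).length : Int) = (wcount true text.toList : Nat) := by
    rw [split0_len]
  have hc : (PySem.Chars.splitOn text.toList ['\t']).foldl (fun a e => a + (e.length : Int)) 0 =
      (text.toList.countP (fun c => c != '\t') : Nat) := by
    rw [splitOn_eq_pieces, ← joinFirst_pieces_nil, chars_fold]
    simp
  have hl : ((PySem.Chars.splitOn text.toList ['\n']).length : Int) - 1 =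
      (text.toList.count '\n' : Nat) := by
    rw [splitOn_eq_pieces, pieces_length]
    push_cast; ring
  have hm : (PySem.Chars.splitOn text.toList ['\n']).foldl
      (fun m e => if (e.length : Int) > m then (e.length : Int) else m) (-1) =
      Gi 0 text.toList := by
    rw [splitOn_eq_pieces, ← joinFirst_pieces_nil, max_fold]
    simp only [List.length_nil, Nat.cast_zero]
    have := le_Gi (0 : Int) text.toList
    omega
  simp only [hw, hc, hl, hm]
  have hfun : ∀ (res : PySem.Dict String Int) (symbol : Char),
      (if symbol = 'm' ∨ symbol = 'l' ∨ symbol = 'L' ∨ symbol = 'w' then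
        res.insert ((PySem.Dict.ofList [('m', "chars"), ('l', "lines"), ('L', "longest_line"), ('w', "words")] : PySem.Dict Char String).getD symbol "")
          ((((((PySem.Dict.ofList [("lines", 0), ("words", 0), ("chars", 0), ("longest_line", 12)] : PySem.Dict String Int).insert "words" ((wcount true text.toList : Nat) : Int)).insert "lines" ((text.toList.count '\n' : Nat) : Int)).insert "longest_line" (Gi 0 text.toList)).insert "chars" ((text.toList.countP (fun c => c != '\t') : Nat) : Int)).getD
            ((PySem.Dict.ofList [('m', "chars"), ('l', "lines"), ('L', "longest_line"), ('w', "words")] : PySem.Dict Char String).getD symbol "") 0)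
      else res) =
      (if symbol = 'm' then res.insert "chars" ((text.toList.countP (fun c => c != '\t') : Nat) : Int)
       else if symbol = 'l' then res.insert "lines" ((text.toList.count '\n' : Nat) : Int)
       else if symbol = 'L' then res.insert "longest_line" (Gi 0 text.toList)
       else if symbol = 'w' then res.insert "words" ((wcount true text.toList : Nat) : Int)
       else res) := by
    intro res symbol
    by_cases h1 : symbol = 'm'
    · subst h1; rfl
    · by_cases h2 : symbol = 'l'
      · subst h2; rfl
      · by_cases h3 : symbol = 'L'
        · subst h3; rfl
        · by_cases h4 : symbol = 'w'
          · subst h4; rfl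
          · simp [h1, h2, h3, h4]
  cases flags with
  | none => rfl
  | some f =>
    by_cases hf : f = ""
    · subst hf; rfl
    · simp only [if_neg hf]
      exact congrArg PySem.Dict.items (List.foldl_ext _ _ _ (fun res symbol _ => hfun res symbol))

-- B reduces to the same normal form
theorem B_norm (text : String) (flags : Option String) :
    count_util_alt text flags =
      render (text.toList.count '\n') (wcount true text.toList)
        (text.toList.countP (fun c => c != '\t')) (Gi 0 text.toList) flags := by
  unfold count_util_alt render
  have hst : text.toList.foldl bstep (0, 0, 0, 0, 0, true) =
      (((text.toList.countP (fun c => c != '\t') : Nat) : Int),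
       ((text.toList.count '\n' : Nat) : Int),
       ((wcount true text.toList : Nat) : Int),
       LL 0 text.toList,
       Gi 0 text.toList,
       LP true text.toList) := by
    rw [bscan text.toList 0 0 0 0 0 true le_rfl le_rfl]
    have := le_Gi (0 : Int) text.toList
    simp only [zero_add, Prod.mk.injEq, and_true, true_and]
    omega
  rw [hst]
  have hfun : ∀ (res : PySem.Dict String Int) (c : Char),
      (if (PySem.Dict.ofList [('m', "chars"), ('l', "lines"), ('L', "longest_line"), ('w', "words")] : PySem.Dict Char String).contains c then
        res.insert ((PySem.Dict.ofList [('m', "chars"), ('l', "lines"), ('L', "longest_line"), ('w', "words")] : PySem.Dict Char String).getD c "")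
          ((PySem.Dict.ofList [("lines", ((text.toList.count '\n' : Nat) : Int)), ("words", ((wcount true text.toList : Nat) : Int)), ("chars", ((text.toList.countP (fun c => c != '\t') : Nat) : Int)), ("longest_line", Gi 0 text.toList)] : PySem.Dict String Int).getD
            ((PySem.Dict.ofList [('m', "chars"), ('l', "lines"), ('L', "longest_line"), ('w', "words")] : PySem.Dict Char String).getD c "") 0)
      else res) =
      (if c = 'm' then res.insert "chars" ((text.toList.countP (fun c => c != '\t') : Nat) : Int)
       else if c = 'l' then res.insert "lines" ((text.toList.count '\n' : Nat) : Int)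
       else if c = 'L' then res.insert "longest_line" (Gi 0 text.toList)
       else if c = 'w' then res.insert "words" ((wcount true text.toList : Nat) : Int)
       else res) := by
    intro res c
    by_cases h1 : c = 'm'
    · subst h1; rfl
    · by_cases h2 : c = 'l'
      · subst h2; rfl
      · by_cases h3 : c = 'L'
        · subst h3; rfl
        · by_cases h4 : c = 'w'
          · subst h4; rfl
          · have hcon : (PySem.Dict.ofList [('m', "chars"), ('l', "lines"), ('L', "longest_line"), ('w', "words")] : PySem.Dict Char String).contains c = false := by
              have hmk : (PySem.Dict.ofList [('m', "chars"), ('l', "lines"), ('L', "longest_line"), ('w', "words")] : PySem.Dict Char String) =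
                  PySem.Dict.mk [('m', "chars"), ('l', "lines"), ('L', "longest_line"), ('w', "words")] := rfl
              rw [hmk, PySem.Dict.contains_mk]
              simp [beq_iff_eq, Ne.symm h1, Ne.symm h2, Ne.symm h3, Ne.symm h4]
            simp [hcon, h1, h2, h3, h4]
  cases flags with
  | none => rfl
  | some f =>
    by_cases hf : f = ""
    · subst hf; rfl
    · simp only [if_neg hf]
      exact congrArg PySem.Dict.items (List.foldl_ext _ _ _ (fun res c _ => hfun res c))

-- ===== VERDICT (by name: the statement is the Claim_ definition above) =====
theorem count_util_spec : Claim_equal_count_util := by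
  intro text flags _
  unfold Spec_count_util
  rw [A_norm, B_norm]
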